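-- pv_equiv track=rewrite | github.com/fuyuan-li/PixelPipeline | tools/scraper/scrapers/carbon.py | _format_carbon_name
-- ===== SOURCE A (Python) =====
-- def _format_carbon_name(token: str) -> str:
--     result = ""
--     for index, ch in enumerate(token):
--         if ch.isdigit():
--             result += "-" + token[index:]
--             break
--         if ch.isupper():
--             if index > 0 and token[index - 1].isupper():
--                 result += ch.lower()
--             else:
--                 result += "-" + ch.lower()
--         else:
--             result += ch
--     return result
-- ===== SOURCE B (Python) =====
-- def _format_carbon_name(token: str) -> str:
--     # Find the index of the first digit (None if there is none).
--     i = next((j for j, c in enumerate(token) if c.isdigit()), None)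
--     head = token if i is None else token[:i]
--     # Decompose head into maximal runs of same isupper()-status:
--     # an uppercase run becomes a dash plus the lowercased run, any other run stays as is.
--     parts = []
--     j = 0
--     n = len(head)
--     while j < n:
--         up = head[j].isupper()
--         k = j + 1
--         while k < n and head[k].isupper() == up:
--             k += 1
--         run = head[j:k]
--         parts.append("-" + run.lower() if up else run)
--         j = k
--     out = "".join(parts)
--     if i is not None:
--         out += "-" + token[i:]
--     return out
-- ===== Notes on version B (the rewrite author's own statement) =====
-- stated objective: alternative
-- what changed: B splits the token at the first digit once, then rewrites the head by maximal uppercase runs (each run becomes a dash plus the lowercased run) instead of A's per-character loop with a previous-character uppercase check.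
import Mathlib
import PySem

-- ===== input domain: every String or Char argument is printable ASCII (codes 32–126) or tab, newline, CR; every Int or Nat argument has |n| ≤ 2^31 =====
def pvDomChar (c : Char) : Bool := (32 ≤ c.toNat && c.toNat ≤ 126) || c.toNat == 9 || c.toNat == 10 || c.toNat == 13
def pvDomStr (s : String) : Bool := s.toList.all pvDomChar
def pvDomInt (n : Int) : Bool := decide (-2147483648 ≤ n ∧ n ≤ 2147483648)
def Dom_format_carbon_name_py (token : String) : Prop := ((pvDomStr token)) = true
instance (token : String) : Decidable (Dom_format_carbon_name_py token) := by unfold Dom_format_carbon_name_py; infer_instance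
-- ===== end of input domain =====

-- B rewrites the token by maximal uppercase runs after splitting once at the first digit,
-- instead of A's per-character loop with a previous-character check (objective: alternative).

-- ===== PORT A =====
-- A's for-loop over enumerate(token) with `break`, ported as structural recursion on the
-- enumerate list; `result` is the accumulator `res`.
def pvAGo (tok : List Char) : List (Int × Char) → List Char → List Char
  | [], res => res
  | (index, ch) :: rest, res =>
    if PySem.Chars.isdigit ch then
      -- result += "-" + token[index:]; break
      res ++ '-' :: PySem.List.slice tok (some index) none
    else if PySem.Chars.isupper ch then
      -- index > 0 and token[index-1].isupper()
      if decide (0 < index) && ((PySem.List.pyGet? tok (index - 1)).map PySem.Chars.isupper).getD false then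
        pvAGo tok rest (res ++ [PySem.Chars.lowerChar ch])
      else
        pvAGo tok rest (res ++ ['-', PySem.Chars.lowerChar ch])
    else
      pvAGo tok rest (res ++ [ch])

def format_carbon_name_py (token : String) : String :=
  String.ofList (pvAGo token.toList (PySem.List.enumerate token.toList 0) [])

-- ===== PORT B =====
-- Source B's inner `while` advances over the maximal run of characters with the same
-- isupper()-status: ported as takeWhile/dropWhile; the outer `while` is this recursion.
def pvRuns (key : Char → Bool) : List Char → List (Bool × List Char)
  | [] => []
  | c :: rest =>
    (key c, c :: rest.takeWhile (fun d => key d == key c))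
      :: pvRuns key (rest.dropWhile (fun d => key d == key c))
termination_by l => l.length
decreasing_by
  simp only [List.length_cons]
  exact Nat.lt_succ_of_le (List.length_dropWhile_le _ _)

-- `parts.append("-" + run.lower() if up else run)`
def pvEmit (g : Bool × List Char) : List Char :=
  if g.1 then '-' :: g.2.map PySem.Chars.lowerChar else g.2

def format_carbon_name_py_alt (token : String) : String :=
  match token.toList.findIdx? PySem.Chars.isdigit with   -- next((j for j, c in ... if c.isdigit()), None)
  | none => String.ofList (((pvRuns PySem.Chars.isupper token.toList).map pvEmit).flatten)
  | some i => String.ofList (((pvRuns PySem.Chars.isupper (token.toList.take i)).map pvEmit).flatten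
                          ++ '-' :: token.toList.drop i)

-- ===== PRECONDITION & SPEC =====
def Spec_format_carbon_name_py (token : String) (out : String) : Prop := out = format_carbon_name_py_alt token
instance (token : String) (out : String) : Decidable (Spec_format_carbon_name_py token out) := by unfold Spec_format_carbon_name_py; infer_instance

-- ===== CLAIM (what is proved, stated in full; the proofs are below) =====
def Claim_equal_format_carbon_name_py : Prop := ∀ (token : String), Dom_format_carbon_name_py token → Spec_format_carbon_name_py token (format_carbon_name_py token)

-- ===== LEMMAS AND PROOFS =====

-- Canonical recursion both ports are reduced to: process chars with a previous-char-uppercase flag.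
def pvCore : List Char → Bool → List Char
  | [], _ => []
  | c :: rest, prevUp =>
    if PySem.Chars.isdigit c then '-' :: c :: rest
    else if PySem.Chars.isupper c then
      (if prevUp then [PySem.Chars.lowerChar c] else ['-', PySem.Chars.lowerChar c]) ++ pvCore rest true
    else c :: pvCore rest false

def pvTail : List Char → List Char
  | [] => []
  | d :: r => '-' :: d :: r

-- A's previous-character test computes exactly "last char of the prefix is uppercase".
lemma pvPrev (pre : List Char) (c : Char) (rest : List Char) :
    (decide (0 < (pre.length : Int)) &&
      ((PySem.List.pyGet? (pre ++ c :: rest) ((pre.length : Int) - 1)).map PySem.Chars.isupper).getD false)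
      = ((pre.getLast?.map PySem.Chars.isupper).getD false) := by
  cases pre using List.reverseRecOn with
  | nil => simp
  | append_singleton pre' p =>
    have h1 : (((pre' ++ [p]).length : Int) - 1) = ((pre'.length : Nat) : Int) := by
      simp only [List.length_append, List.length_singleton]; push_cast; ring
    rw [h1, PySem.List.pyGet?_natCast]
    simp

lemma pvAGo_eq (s : List Char) : ∀ (pre res : List Char),
    pvAGo (pre ++ s) (PySem.List.enumerate s (pre.length : Int)) res
      = res ++ pvCore s ((pre.getLast?.map PySem.Chars.isupper).getD false) := by
  induction s with
  | nil => intro pre res; simp [pvAGo, pvCore, PySem.List.enumerate]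
  | cons c rest ih =>
    intro pre res
    rw [PySem.List.enumerate_cons, pvAGo]
    have hlen : ((pre.length : Int) + 1) = (((pre ++ [c]).length : Nat) : Int) := by
      simp
    have happ : pre ++ c :: rest = (pre ++ [c]) ++ rest := by simp
    by_cases hd : PySem.Chars.isdigit c
    · rw [if_pos hd]
      rw [PySem.List.slice_from_natCast]
      simp [pvCore, hd]
    · rw [if_neg hd]
      by_cases hu : PySem.Chars.isupper c
      · rw [if_pos hu, pvPrev]
        by_cases hp : ((pre.getLast?.map PySem.Chars.isupper).getD false) = true
        · rw [if_pos (by rw [hp])]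
          rw [hlen, happ, ih (pre ++ [c])]
          simp [pvCore, hd, hu, hp]
        · rw [if_neg (by simpa using hp)]
          rw [hlen, happ, ih (pre ++ [c])]
          simp [pvCore, hd, hu, eq_false_of_ne_true hp]
      · rw [if_neg hu]
        rw [hlen, happ, ih (pre ++ [c])]
        simp [pvCore, hd, hu]

-- the prevUp flag is irrelevant when the next char is not a (non-digit) uppercase letter
lemma pvCore_flag (c : Char) (r : List Char)
    (h : PySem.Chars.isupper c = false ∨ PySem.Chars.isdigit c = true) (b b' : Bool) :
    pvCore (c :: r) b = pvCore (c :: r) b' := by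
  rcases h with h | h <;> simp [pvCore, h]

lemma pvCore_upper_run (run : List Char)
    (h : ∀ d ∈ run, PySem.Chars.isdigit d = false ∧ PySem.Chars.isupper d = true)
    (z : List Char) :
    pvCore (run ++ z) true = run.map PySem.Chars.lowerChar ++ pvCore z true := by
  induction run with
  | nil => simp
  | cons d r ih =>
    have hd := h d (by simp)
    simp [pvCore, hd.1, hd.2, ih (fun x hx => h x (by simp [hx]))]

lemma pvCore_lower_run (c : Char) (run : List Char)
    (hc : PySem.Chars.isupper c = false) (hcd : PySem.Chars.isdigit c = false)
    (h : ∀ d ∈ run, PySem.Chars.isdigit d = false ∧ PySem.Chars.isupper d = false)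
    (z : List Char) (b : Bool) :
    pvCore (c :: run ++ z) b = c :: run ++ pvCore z false := by
  induction run generalizing c b with
  | nil => simp [pvCore, hc, hcd]
  | cons d r ih =>
    have hd := h d (by simp)
    simp only [pvCore, hcd, hc, Bool.false_eq_true, if_false, List.cons_append]
    exact congrArg (c :: ·) (ih d hd.2 hd.1 (fun x hx => h x (by simp [hx])) false)

lemma pvMain : ∀ (n : Nat) (cs : List Char), cs.length ≤ n →
    (∀ x ∈ cs, PySem.Chars.isdigit x = false) →
    ∀ tail, (tail = [] ∨ ∃ d r, tail = d :: r ∧ PySem.Chars.isdigit d = true) →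
    pvCore (cs ++ tail) false
      = ((pvRuns PySem.Chars.isupper cs).map pvEmit).flatten ++ pvTail tail := by
  intro n
  induction n with
  | zero =>
    intro cs hlen _ tail htail
    have : cs = [] := List.length_eq_zero_iff.mp (Nat.le_zero.mp hlen)
    subst this
    rcases htail with rfl | ⟨d, r, rfl, hd⟩ <;> simp [pvRuns, pvCore, pvTail, *]
  | succ n ih =>
    intro cs hlen hnd tail htail
    match cs with
    | [] => rcases htail with rfl | ⟨d, r, rfl, hd⟩ <;> simp [pvRuns, pvCore, pvTail, *]
    | c :: rest =>
      have hcd : PySem.Chars.isdigit c = false := hnd c (by simp)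
      set up := PySem.Chars.isupper c with hup
      set run := rest.takeWhile (fun d => PySem.Chars.isupper d == up) with hrun
      set rest' := rest.dropWhile (fun d => PySem.Chars.isupper d == up) with hrest'
      have hsplit : rest = run ++ rest' := (List.takeWhile_append_dropWhile).symm
      have hrunfacts : ∀ d ∈ run, PySem.Chars.isdigit d = false ∧ PySem.Chars.isupper d = up := by
        intro d hdm
        refine ⟨hnd d (by rw [hsplit] at *; simp [List.mem_append.mpr (Or.inl hdm)]), ?_⟩
        have := List.mem_takeWhile_imp hdm
        simpa using this
      have hrest'facts : ∀ x ∈ rest', PySem.Chars.isdigit x = false := by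
        intro x hx
        exact hnd x (by rw [hsplit]; simp [hx])
      have hlen' : rest'.length ≤ n := by
        have h := List.length_dropWhile_le (fun d => PySem.Chars.isupper d == up) rest
        rw [← hrest'] at h
        simp at hlen; omega
      have hRuns : pvRuns PySem.Chars.isupper (c :: rest)
          = (up, c :: run) :: pvRuns PySem.Chars.isupper rest' := by
        rw [pvRuns]
      have hIH := ih rest' hlen' hrest'facts tail htail
      rcases Bool.eq_false_or_eq_true up with hu | hu
      · -- uppercase run
        have hcu : PySem.Chars.isupper c = true := by rw [← hup]; exact hu
        have hstep : pvCore ((c :: rest) ++ tail) false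
            = '-' :: PySem.Chars.lowerChar c :: (run.map PySem.Chars.lowerChar ++ pvCore (rest' ++ tail) true) := by
          rw [hsplit]
          simp only [List.cons_append, List.append_assoc, pvCore, hcd, hcu,
            Bool.false_eq_true, if_false, if_true]
          rw [pvCore_upper_run run
            (fun d hd => ⟨(hrunfacts d hd).1, by rw [(hrunfacts d hd).2]; exact hu⟩)]
          simp
        -- the flag entering rest'++tail can be reset to false (its head is not uppercase)
        have hflag : pvCore (rest' ++ tail) true = pvCore (rest' ++ tail) false := by
          cases hrc : rest' with
          | nil =>
            rcases htail with rfl | ⟨d, r, rfl, hd⟩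
            · simp [pvCore]
            · simpa [hrc] using pvCore_flag d r (Or.inr hd) true false
          | cons e r' =>
            have he : PySem.Chars.isupper e = false := by
              have h := List.head?_dropWhile_not (fun d => PySem.Chars.isupper d == up) rest
              rw [← hrest', hrc] at h
              simp [hu] at h
              exact h
            simpa using pvCore_flag e (r' ++ tail) (Or.inl he) true false
        rw [hstep, hflag, hIH, hRuns]
        simp [pvEmit, hu]
      · -- non-uppercase run
        have hstep : pvCore ((c :: rest) ++ tail) false = c :: run ++ pvCore (rest' ++ tail) false := by
          rw [hsplit]
          have := pvCore_lower_run c run (by rw [← hup]; exact hu) hcd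
            (fun d hd => ⟨(hrunfacts d hd).1, by rw [(hrunfacts d hd).2]; exact hu⟩)
            (rest' ++ tail) false
          simpa using this
        rw [hstep, hIH, hRuns]
        simp [pvEmit, hu]

-- ===== VERDICT (by name: the statement is the Claim_ definition above) =====
theorem format_carbon_name_py_spec : Claim_equal_format_carbon_name_py := by
  intro token _
  show format_carbon_name_py token = format_carbon_name_py_alt token
  unfold format_carbon_name_py format_carbon_name_py_alt
  have hA : pvAGo token.toList (PySem.List.enumerate token.toList 0) [] = pvCore token.toList false := by
    have := pvAGo_eq token.toList [] []
    simpa using this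
  rw [hA]
  cases hfi : token.toList.findIdx? PySem.Chars.isdigit with
  | none =>
    rw [List.findIdx?_eq_none_iff] at hfi
    have := pvMain token.toList.length token.toList le_rfl
      (fun x hx => by simpa using hfi x hx) [] (Or.inl rfl)
    simp [pvTail] at this
    rw [this]
  | some i =>
    rw [List.findIdx?_eq_some_iff_getElem] at hfi
    obtain ⟨hi, hdig, hbefore⟩ := hfi
    have hnd : ∀ x ∈ token.toList.take i, PySem.Chars.isdigit x = false := by
      intro x hx
      obtain ⟨j, hj, hxe⟩ := List.mem_iff_getElem.mp hx
      have hj' : j < i := by simp at hj; exact hj.1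
      have : (token.toList.take i)[j] = token.toList[j]'(by omega) := by
        simp [List.getElem_take]
      rw [this] at hxe
      subst hxe
      simpa using hbefore j hj'
    have hdrop : token.toList.drop i = token.toList[i] :: token.toList.drop (i + 1) :=
      List.drop_eq_getElem_cons hi
    have := pvMain (token.toList.take i).length (token.toList.take i) le_rfl hnd
      (token.toList.drop i) (Or.inr ⟨token.toList[i], token.toList.drop (i + 1), hdrop, hdig⟩)
    rw [List.take_append_drop] at this
    rw [this, hdrop]
    simp [pvTail]
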